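-- pv_equiv track=rewrite | github.com/zzang1310/ckd-generation | build_prompt_dataset_v11_Prognosis.py | rle_missing
-- ===== SOURCE A (Python) =====
-- from typing import Dict, List, Any, Optional, Tuple
--
-- MISSING_DISPLAY: str = "NA"  # 결측 표시 토큰 (짧은 창도 'NA'로 표기)
--
-- def rle_missing(seq: List[str], min_run: int) -> List[str]:
--     """'NA' 연속구간 NAxN 압축.
--
--     NOTE: Behavior preserved. No logic change.
--     """
--     if not seq:
--         return seq
--     compact: List[str] = []
--     i = 0
--     n = len(seq)
--     while i < n:
--         token = seq[i]
--         if token == MISSING_DISPLAY: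
--             j = i
--             while j < n and seq[j] == MISSING_DISPLAY:
--                 j += 1
--             run_len = j - i
--             if run_len >= min_run:
--                 compact.append(f"NAx{run_len}")
--             else:
--                 compact.extend([MISSING_DISPLAY] * run_len)
--             i = j
--         else:
--             compact.append(token)
--             i += 1
--     return compact
-- ===== SOURCE B (Python) =====
-- MISSING_DISPLAY: str = "NA"
--
-- def rle_missing(seq, min_run):
--     """'NA' run compression driven by the non-'NA' tokens: walk the sequence
--     once, and at each non-'NA' token derive the length of the NA gap before it
--     by index arithmetic (i - prev) instead of scanning the NAs themselves."""
--     def gap(k):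
--         if k == 0:
--             return []
--         return [f"NAx{k}"] if k >= min_run else [MISSING_DISPLAY] * k
--     out = []
--     prev = 0
--     for i, token in enumerate(seq):
--         if token != MISSING_DISPLAY:
--             out += gap(i - prev)
--             out.append(token)
--             prev = i + 1
--     out += gap(len(seq) - prev)
--     return out
-- ===== Notes on version B (the rewrite author's own statement) =====
-- stated objective: alternative
-- what changed: B never scans NA runs: it walks the sequence once keeping the index after the last non-'NA' token and derives each NA-gap length by index arithmetic (i - prev) at the non-'NA' tokens plus one final flush, instead of A's nested while-scan over each NA run.
import Mathlib
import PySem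

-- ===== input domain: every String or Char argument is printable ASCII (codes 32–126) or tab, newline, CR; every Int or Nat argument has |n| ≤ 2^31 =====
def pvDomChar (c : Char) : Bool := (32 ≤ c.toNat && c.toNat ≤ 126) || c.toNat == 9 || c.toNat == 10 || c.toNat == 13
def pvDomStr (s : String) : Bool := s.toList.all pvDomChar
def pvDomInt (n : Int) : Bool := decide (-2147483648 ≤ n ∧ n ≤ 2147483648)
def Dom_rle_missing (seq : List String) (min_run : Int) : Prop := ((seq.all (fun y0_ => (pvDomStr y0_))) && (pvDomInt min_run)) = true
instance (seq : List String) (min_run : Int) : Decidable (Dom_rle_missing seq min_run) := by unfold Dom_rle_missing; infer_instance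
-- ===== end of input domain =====

-- B drives the compression from the non-'NA' tokens: one pass keeping only the
-- index after the last non-'NA' token, each NA-gap length obtained by index
-- arithmetic instead of A's nested while-scan over the NA run.

-- ===== PORT A =====

-- inner while loop 'while j < n and seq[j] == "NA": j += 1' counted from position i
def pyNaLen : List String → Nat
  | [] => 0
  | s :: r => if s = "NA" then pyNaLen r + 1 else 0

-- the outer while loop over i; in the "NA" branch run_len = pyNaLen rest + 1
-- (the current token is "NA") and i jumps to j, i.e. the run is dropped.
def rle_missing (seq : List String) (min_run : Int) : List String :=
  match seq with
  | [] => []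
  | t :: rest =>
    if t = "NA" then
      let run_len : Nat := pyNaLen rest + 1
      (if (run_len : Int) ≥ min_run then ["NAx" ++ PySem.Int.toStr (run_len : Int)]
       else List.replicate run_len "NA")
        ++ rle_missing (List.drop (pyNaLen rest) rest) min_run
    else
      t :: rle_missing rest min_run
termination_by seq.length
decreasing_by all_goals simp [List.length_drop]

-- ===== PORT B =====

-- the nested helper gap(k): [] for k == 0, 'NAxk' if k >= min_run, else k copies of 'NA'
def gapB (min_run : Int) (k : Nat) : List String :=
  if k = 0 then []
  else if (k : Int) ≥ min_run then ["NAx" ++ PySem.Int.toStr (k : Int)]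
  else List.replicate k "NA"

-- the for loop over enumerate(seq), state (out, prev)
def loopB (min_run : Int) : List (Int × String) → List String → Int → List String × Int
  | [], out, prev => (out, prev)
  | (i, t) :: r, out, prev =>
    if t ≠ "NA" then loopB min_run r (out ++ gapB min_run (i - prev).toNat ++ [t]) (i + 1)
    else loopB min_run r out prev

def rle_missing_alt (seq : List String) (min_run : Int) : List String :=
  let st := loopB min_run (PySem.List.enumerate seq) [] 0
  st.1 ++ gapB min_run ((seq.length : Int) - st.2).toNat

-- ===== PRECONDITION & SPEC =====
def Spec_rle_missing (seq : List String) (min_run : Int) (out : List String) : Prop := out = rle_missing_alt seq min_run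
instance (seq : List String) (min_run : Int) (out : List String) : Decidable (Spec_rle_missing seq min_run out) := by unfold Spec_rle_missing; infer_instance

-- ===== CLAIM (what is proved, stated in full; the proofs are below) =====
def Claim_equal_rle_missing : Prop := ∀ (seq : List String) (min_run : Int), Dom_rle_missing seq min_run → Spec_rle_missing seq min_run (rle_missing seq min_run)

-- ===== LEMMAS AND PROOFS =====

lemma rle_missing_nil (m : Int) : rle_missing [] m = [] := by rw [rle_missing]

lemma rle_missing_cons (t : String) (rest : List String) (m : Int) :
    rle_missing (t :: rest) m
      = if t = "NA" then
          (if ((pyNaLen rest + 1 : Nat) : Int) ≥ m then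
             ["NAx" ++ PySem.Int.toStr ((pyNaLen rest + 1 : Nat) : Int)]
           else List.replicate (pyNaLen rest + 1) "NA")
            ++ rle_missing (List.drop (pyNaLen rest) rest) m
        else t :: rle_missing rest m := by
  rw [rle_missing]

lemma pyNaLen_replicate_append (c : Nat) (l : List String)
    (hl : pyNaLen l = 0) : pyNaLen (List.replicate c "NA" ++ l) = c := by
  induction c with
  | zero => simpa
  | succ k ih => simp [List.replicate_succ, pyNaLen, ih]

lemma pyNaLen_cons_ne (t : String) (ht : t ≠ "NA") (l : List String) :
    pyNaLen (t :: l) = 0 := by simp [pyNaLen, ht]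

-- A on a leading NA-block followed by a non-NA token (or nothing)
lemma rle_na_block (c : Nat) (l : List String) (hl : pyNaLen l = 0) (m : Int) :
    rle_missing (List.replicate c "NA" ++ l) m = gapB m c ++ rle_missing l m := by
  cases c with
  | zero => simp [gapB]
  | succ k =>
    rw [List.replicate_succ, List.cons_append, rle_missing_cons]
    have h1 : pyNaLen (List.replicate k "NA" ++ l) = k := pyNaLen_replicate_append k l hl
    have h2 : List.drop k (List.replicate k "NA" ++ l) = l := by
      rw [List.drop_append_of_le_length (by simp)]; simp
    simp [h1, h2, gapB]

lemma rle_cons_ne (t : String) (ht : t ≠ "NA") (rest : List String) (m : Int) :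
    rle_missing (t :: rest) m = t :: rle_missing rest m := by
  rw [rle_missing_cons]; simp [ht]

-- loop invariant: enumeration starting at k with prev ≤ k means k - prev NAs pending
lemma loopB_invariant (m : Int) (seq : List String) :
    ∀ (k : Nat) (prev : Nat) (out : List String), prev ≤ k →
    (loopB m (PySem.List.enumerate seq (k : Int)) out (prev : Int)).1
      ++ gapB m ((((k : Int) + seq.length) - (loopB m (PySem.List.enumerate seq (k : Int)) out (prev : Int)).2)).toNat
    = out ++ rle_missing (List.replicate (k - prev) "NA" ++ seq) m := by
  induction seq with
  | nil =>
    intro k prev out hpk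
    simp only [PySem.List.enumerate_nil, loopB, List.length_nil]
    rw [rle_na_block (k - prev) [] rfl m, rle_missing_nil, List.append_nil]
    congr 2
    omega
  | cons t rest ih =>
    intro k prev out hpk
    rw [PySem.List.enumerate_cons]
    by_cases ht : t = "NA"
    · subst ht
      simp only [loopB]
      rw [if_neg (fun h => h rfl)]
      have := ih (k + 1) prev out (by omega)
      rw [show (((k + 1 : Nat)) : Int) = (k : Int) + 1 by push_cast; ring] at this
      rw [show ((k : Int) + (List.length (("NA" : String) :: rest) : Int))
            = ((k : Int) + 1 + (rest.length : Int)) by push_cast [List.length_cons]; ring]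
      rw [this]
      congr 1
      rw [show k + 1 - prev = (k - prev) + 1 by omega, List.replicate_succ' ]
      simp
    · simp only [loopB, if_pos (by simpa using ht)]
      have := ih (k + 1) (k + 1) (out ++ gapB m ((k : Int) - (prev : Int)).toNat ++ [t]) le_rfl
      rw [show (((k + 1 : Nat)) : Int) = (k : Int) + 1 by push_cast; ring] at this
      rw [show ((k : Int) + (List.length (t :: rest) : Int))
            = ((k : Int) + 1 + (rest.length : Int)) by push_cast [List.length_cons]; ring]
      rw [this]
      have hkp : ((k : Int) - (prev : Int)).toNat = k - prev := by omega
      rw [hkp]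
      simp only [Nat.sub_self, List.replicate_zero, List.nil_append]
      rw [rle_na_block (k - prev) (t :: rest) (pyNaLen_cons_ne t ht rest) m,
          rle_cons_ne t ht rest m]
      simp

-- ===== VERDICT (by name: the statement is the Claim_ definition above) =====
theorem rle_missing_spec : Claim_equal_rle_missing := by
  intro seq m _
  unfold Spec_rle_missing rle_missing_alt
  have h := loopB_invariant m seq 0 0 [] le_rfl
  simp only [Nat.cast_zero, Nat.sub_zero, List.replicate_zero, List.nil_append,
    zero_add] at h
  exact h.symm
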